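-- pv_equiv track=rewrite | github.com/DPFNeiland/Python-Environment | Estudos/CriteirosDeDivisibilidade/Criterio1.py | CalcularResto
-- ===== SOURCE A (Python) =====
-- def TransformarCharPraInt(c):
--     return ord(c) - ord('0')
--
-- def CalcularResto(s: str, d: int) -> int:
--     base = 1 % d
--     res = 0
--
--     for i in range(len(s) -1, -1, -1):
--         digito = TransformarCharPraInt(s[i])
--
--         res = (res + (digito*base)%d)%d
--
--         base = (base*10) % d
--
--     return res
-- ===== SOURCE B (Python) =====
-- def TransformarCharPraInt(c):
--     return ord(c) - ord('0')
--
-- def CalcularResto(s: str, d: int) -> int: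
--     # Horner's method, left to right: no power/base table needed.
--     res = 0
--     for c in s:
--         res = (res * 10 + TransformarCharPraInt(c)) % d
--     return res
-- ===== Notes on version B (the rewrite author's own statement) =====
-- stated objective: simpler
-- what changed: Replaces the right-to-left digit loop that maintains a running power-of-ten table (base) with a left-to-right Horner accumulation res = (res*10 + digit) % d, eliminating the base variable and the index arithmetic.
import Mathlib
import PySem

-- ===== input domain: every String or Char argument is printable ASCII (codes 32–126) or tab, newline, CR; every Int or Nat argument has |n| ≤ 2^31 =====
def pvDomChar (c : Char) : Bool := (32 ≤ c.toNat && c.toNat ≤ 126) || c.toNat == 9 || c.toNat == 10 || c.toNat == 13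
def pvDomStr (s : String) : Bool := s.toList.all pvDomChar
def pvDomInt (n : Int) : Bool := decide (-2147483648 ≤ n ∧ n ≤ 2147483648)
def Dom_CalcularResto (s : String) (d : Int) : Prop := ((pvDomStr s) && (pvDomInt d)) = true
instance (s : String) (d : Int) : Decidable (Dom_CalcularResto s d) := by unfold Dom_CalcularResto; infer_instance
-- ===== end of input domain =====

-- B replaces A's right-to-left loop with its power-of-ten table by left-to-right Horner accumulation (simpler; same O(n)).

-- ===== PORT A =====
def TransformarCharPraInt (c : Char) : Int := (c.toNat : Int) - ('0'.toNat : Int)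

def CalcularResto (s : String) (d : Int) : Int :=
  let cs := s.toList
  -- state (res, base); base starts at 1 % d, res at 0
  (((PySem.List.pyRange ((cs.length : Int) - 1) (-1) (-1)).foldl
      (fun (p : Int × Int) i =>
        let digito := TransformarCharPraInt (PySem.List.pyGetD cs i ' ')
        (PySem.Int.mod (p.1 + PySem.Int.mod (digito * p.2) d) d,
         PySem.Int.mod (p.2 * 10) d))
      (0, PySem.Int.mod 1 d))).1

-- ===== PORT B =====
def TransformarCharPraInt_alt (c : Char) : Int := (c.toNat : Int) - ('0'.toNat : Int)

def CalcularResto_alt (s : String) (d : Int) : Int :=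
  s.toList.foldl (fun res c => PySem.Int.mod (res * 10 + TransformarCharPraInt_alt c) d) 0

-- ===== PRECONDITION & SPEC =====
-- Python A raises ZeroDivisionError exactly when d = 0 (base = 1 % d).
def Pre_CalcularResto (s : String) (d : Int) : Prop := d ≠ 0
instance (s : String) (d : Int) : Decidable (Pre_CalcularResto s d) := by unfold Pre_CalcularResto; infer_instance
def pvWitness_CalcularResto : String × Int := ("123", 7)

def Spec_CalcularResto (s : String) (d : Int) (out : Int) : Prop := out = CalcularResto_alt s d
instance (s : String) (d : Int) (out : Int) : Decidable (Spec_CalcularResto s d out) := by unfold Spec_CalcularResto; infer_instance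

-- ===== CLAIM (what is proved, stated in full; the proofs are below) =====
def Claim_equal_CalcularResto : Prop := ∀ (s : String) (d : Int), Dom_CalcularResto s d → Pre_CalcularResto s d → Spec_CalcularResto s d (CalcularResto s d)

-- ===== LEMMAS AND PROOFS =====

-- d divides a - a.fmod d  (PySem.Int.mod is Int.fmod)
theorem pv_dvd_sub_fmod (a d : Int) : d ∣ a - a.fmod d :=
  ⟨a.fdiv d, by have h := Int.fmod_add_mul_fdiv a d; linarith⟩

-- fmod is a congruence: equal residues give equal fmod
theorem pv_fmod_congr {a b d : Int} (h : d ∣ a - b) : a.fmod d = b.fmod d := by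
  obtain ⟨k, hk⟩ := h
  have : a = b + d * k := by linarith
  rw [this, Int.add_mul_fmod_self_left]

-- reversed-suffix value: Σ t(l_j) · 10^j over a list taken least-significant-first
def pvRv (l : List Char) : Int :=
  l.foldr (fun c acc => TransformarCharPraInt c + 10 * acc) 0

-- A's loop invariant: starting from residues of r and b, the fold produces (r + b·pvRv l) fmod d
theorem pv_A_loop (d : Int) : ∀ (l : List Char) (r b : Int),
    ((l.foldl
        (fun (p : Int × Int) c =>
          (Int.fmod (p.1 + Int.fmod (TransformarCharPraInt c * p.2) d) d,
           Int.fmod (p.2 * 10) d))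
        (r.fmod d, b.fmod d))).1 = (r + b * pvRv l).fmod d := by
  intro l
  induction l with
  | nil => intro r b; simp [pvRv]
  | cons c l ih =>
    intro r b
    have h1 : Int.fmod (r.fmod d + Int.fmod (TransformarCharPraInt c * b.fmod d) d) d
        = (r + TransformarCharPraInt c * b).fmod d := by
      apply pv_fmod_congr
      obtain ⟨x, hx⟩ := pv_dvd_sub_fmod r d
      obtain ⟨y, hy⟩ := pv_dvd_sub_fmod b d
      obtain ⟨z, hz⟩ := pv_dvd_sub_fmod (TransformarCharPraInt c * b.fmod d) d
      exact ⟨-(x + z + TransformarCharPraInt c * y), by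
        linear_combination (-1 : Int) * hx + (-1 : Int) * hz + (-(TransformarCharPraInt c)) * hy⟩
    have h2 : Int.fmod (b.fmod d * 10) d = (b * 10).fmod d := by
      apply pv_fmod_congr
      obtain ⟨y, hy⟩ := pv_dvd_sub_fmod b d
      exact ⟨-(y * 10), by linarith⟩
    simp only [List.foldl_cons, h1, h2, ih]
    congr 1
    simp [pvRv]; ring

-- pvRv of a snoc adds the new most-significant digit
theorem pv_rv_append (m : List Char) (c : Char) :
    pvRv (m ++ [c]) = pvRv m + TransformarCharPraInt c * 10 ^ m.length := by
  induction m with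
  | nil => simp [pvRv]
  | cons x m ih => simp [pvRv] at ih ⊢; rw [ih]; ring

-- Horner's fold computes pvRv of the reversed list (plus the scaled seed)
theorem pv_horner_rv : ∀ (l : List Char) (a : Int),
    l.foldl (fun r c => r * 10 + TransformarCharPraInt c) a
      = a * 10 ^ l.length + pvRv l.reverse := by
  intro l
  induction l with
  | nil => intro a; simp [pvRv]
  | cons c l ih =>
    intro a
    simp only [List.foldl_cons, ih, List.reverse_cons, pv_rv_append, List.length_reverse,
      List.length_cons]
    ring

-- B's loop with the running fmod equals fmod of the plain Horner fold
theorem pv_B_loop (d : Int) : ∀ (l : List Char) (a : Int),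
    l.foldl (fun res c => Int.fmod (res * 10 + TransformarCharPraInt_alt c) d) (a.fmod d)
      = (l.foldl (fun r c => r * 10 + TransformarCharPraInt c) a).fmod d := by
  intro l
  induction l with
  | nil => intro a; rfl
  | cons c l ih =>
    intro a
    have h : Int.fmod (a.fmod d * 10 + TransformarCharPraInt_alt c) d
        = (a * 10 + TransformarCharPraInt c).fmod d := by
      apply pv_fmod_congr
      obtain ⟨y, hy⟩ := pv_dvd_sub_fmod a d
      exact ⟨-(y * 10), by simp only [TransformarCharPraInt_alt, TransformarCharPraInt]; linarith⟩
    simp only [List.foldl_cons, h, ih]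

-- ===== VERDICT (by name: the statement is the Claim_ definition above) =====
theorem CalcularResto_spec : Claim_equal_CalcularResto := by
  intro s d _ _
  unfold Spec_CalcularResto CalcularResto CalcularResto_alt
  show (((PySem.List.pyRange ((s.toList.length : Int) - 1) (-1) (-1)).foldl
      (fun (p : Int × Int) i =>
        (PySem.Int.mod (p.1 + PySem.Int.mod (TransformarCharPraInt (PySem.List.pyGetD s.toList i ' ') * p.2) d) d,
         PySem.Int.mod (p.2 * 10) d))
      (0, PySem.Int.mod 1 d))).1
    = s.toList.foldl (fun res c => PySem.Int.mod (res * 10 + TransformarCharPraInt_alt c) d) 0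
  simp only [PySem.Int.mod]
  have hrange : PySem.List.pyRange ((s.toList.length : Int) - 1) (-1) (-1)
      = (PySem.List.pyRange 0 (s.toList.length : Int) 1).reverse := by
    rw [PySem.List.pyRange_neg_one_eq_reverse]
    norm_num
  rw [hrange]
  have hmap : (PySem.List.pyRange 0 (s.toList.length : Int) 1).map
      (fun j => PySem.List.pyGetD s.toList j ' ') = s.toList :=
    PySem.List.map_pyGetD_pyRange_zero' s.toList ' '
  have key :
      (PySem.List.pyRange 0 (s.toList.length : Int) 1).reverse.foldl
        (fun (p : Int × Int) i =>
          ((p.1 + (TransformarCharPraInt (PySem.List.pyGetD s.toList i ' ') * p.2).fmod d).fmod d,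
           (p.2 * 10).fmod d)) (0, Int.fmod 1 d)
      = s.toList.reverse.foldl
        (fun (p : Int × Int) c =>
          ((p.1 + (TransformarCharPraInt c * p.2).fmod d).fmod d, (p.2 * 10).fmod d))
        (0, Int.fmod 1 d) := by
    conv_rhs => rw [← hmap]
    rw [← List.map_reverse, List.foldl_map]
  rw [key]
  rw [show ((0 : Int), Int.fmod 1 d) = (Int.fmod 0 d, Int.fmod 1 d) by rw [Int.zero_fmod]]
  rw [pv_A_loop d s.toList.reverse 0 1]
  rw [show (0 : Int) = Int.fmod 0 d from (Int.zero_fmod d).symm]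
  rw [pv_B_loop d s.toList 0, pv_horner_rv]
  norm_num
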